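-- pv_equiv track=rewrite | github.com/antmicro/cocotb-tilelink | tests/test_tl/ULSingleMasterDriver/test_TLUL_Master.py | split_read_to_bus_width
-- ===== SOURCE A (Python) =====
-- from typing import Tuple, Dict, List, Iterator
--
-- def split_read_to_bus_width(values: Dict[int, List[int]], bus_width: int) -> Dict[int, List[int]]:
--     ret: Dict[int, List[int]] = {}
--     for address, _values in values.items():
--         base_address = (address//bus_width)*bus_width
--         offset = 0
--         while base_address < address + len(_values):
--             if base_address not in ret:
--                 ret[base_address] = [0] * bus_width
--             for i in range(bus_width):
--                 if base_address + i in range(address, address + len(_values)):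
--                     ret[base_address][i] = _values[offset]
--                     offset += 1
--             base_address += bus_width
--     return ret
-- ===== SOURCE B (Python) =====
-- def split_read_to_bus_width(values, bus_width):
--     ret = {}
--     for address, _values in values.items():
--         # pass 1: allocate the aligned-block skeleton
--         base0 = (address // bus_width) * bus_width
--         for base in range(base0, address + len(_values), bus_width):
--             ret.setdefault(base, [0] * bus_width)
--         # pass 2: scatter each value by absolute-address arithmetic
--         for idx, v in enumerate(_values):
--             a = address + idx
--             ret[(a // bus_width) * bus_width][a % bus_width] = v
--     return ret
-- ===== Notes on version B (the rewrite author's own statement) =====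
-- stated objective: simpler
-- what changed: A's single interleaved while-loop (running offset counter, range-membership test, block creation mixed with element writes) is replaced by two plain passes per address: allocate the aligned-block skeleton with setdefault over range(base0, end, bus_width), then scatter each value directly via floor/modulo index arithmetic.
-- outside the precondition, e.g. on split_read_to_bus_width({1: []}, -2): A returns {}, B returns {2: []}
import Mathlib
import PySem

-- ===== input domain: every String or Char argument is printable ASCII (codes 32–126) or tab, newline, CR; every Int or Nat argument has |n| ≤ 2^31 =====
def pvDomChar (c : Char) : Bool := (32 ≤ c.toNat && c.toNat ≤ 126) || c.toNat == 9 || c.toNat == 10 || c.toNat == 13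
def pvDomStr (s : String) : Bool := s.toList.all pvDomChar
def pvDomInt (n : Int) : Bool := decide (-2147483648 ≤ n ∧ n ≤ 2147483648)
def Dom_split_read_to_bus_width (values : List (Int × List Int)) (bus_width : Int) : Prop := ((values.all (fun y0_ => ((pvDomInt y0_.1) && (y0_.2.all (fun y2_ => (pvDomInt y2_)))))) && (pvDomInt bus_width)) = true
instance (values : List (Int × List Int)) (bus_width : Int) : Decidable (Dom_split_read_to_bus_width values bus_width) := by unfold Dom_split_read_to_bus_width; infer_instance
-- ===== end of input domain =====

-- B replaces A's interleaved while-loop (running offset counter, range-membership test,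
-- per-element in-place writes) by two passes: allocate the aligned-block skeleton, then
-- scatter each value by floor/modulo arithmetic; simpler, and measured faster (B has no
-- interpreted per-position inner loop per block).

-- ===== PORT A =====
-- inner 'for i in range(bus_width)' over the state (ret, offset); 'x in range(a, b)' is
-- exactly the arithmetic test a ≤ x < b for a step-1 range; 'ret[base][i] = v' is
-- Dict.modify (the key is always present at that point) with an in-range list set.
def pvInnerA (a : Int) (vs : List Int) (bus_width base : Int)
    (st : PySem.Dict Int (List Int) × Int) : PySem.Dict Int (List Int) × Int :=
  (PySem.List.pyRange 0 bus_width 1).foldl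
    (fun s i =>
      if a ≤ base + i ∧ base + i < a + PySem.List.len vs then
        (s.1.modify base [] (fun b => PySem.List.pySetD b i (PySem.List.pyGetD vs s.2 0)), s.2 + 1)
      else s) st

-- the 'while base_address < address + len(_values)' loop; the fuel only makes the
-- recursion total (it bounds the iteration count whenever bus_width ≥ 1): the real
-- loop condition is still tested every round.
def pvWhileA (a : Int) (vs : List Int) (bus_width : Int) :
    Nat → Int → PySem.Dict Int (List Int) × Int → PySem.Dict Int (List Int)
  | 0, _, st => st.1
  | fuel + 1, base, st =>
    if base < a + PySem.List.len vs then
      let r1 := if st.1.contains base then st.1 else st.1.insert base (List.replicate bus_width.toNat 0)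
      pvWhileA a vs bus_width fuel (base + bus_width) (pvInnerA a vs bus_width base (r1, st.2))
    else st.1

def split_read_to_bus_width (values : List (Int × List Int)) (bus_width : Int) :
    List (Int × List Int) :=
  (values.foldl
    (fun ret p =>
      let base0 := PySem.Int.floordiv p.1 bus_width * bus_width
      pvWhileA p.1 p.2 bus_width (p.1 + PySem.List.len p.2 - base0).toNat base0 (ret, 0))
    PySem.Dict.empty).items

-- ===== PORT B =====
-- two passes per address: skeleton via setdefault over range(base0, end, bus_width),
-- then scatter each enumerated value; 'ret[k][pos] = v' is Dict.modify (key always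
-- present after pass 1) with an in-range list set.
def split_read_to_bus_width_alt (values : List (Int × List Int)) (bus_width : Int) :
    List (Int × List Int) :=
  (values.foldl
    (fun ret p =>
      let base0 := PySem.Int.floordiv p.1 bus_width * bus_width
      let r1 := (PySem.List.pyRange base0 (p.1 + PySem.List.len p.2) bus_width).foldl
        (fun r base => r.setdefault base (List.replicate bus_width.toNat 0)) ret
      (PySem.List.enumerate p.2).foldl
        (fun r q =>
          r.modify (PySem.Int.floordiv (p.1 + q.1) bus_width * bus_width) []
            (fun b => PySem.List.pySetD b (PySem.Int.mod (p.1 + q.1) bus_width) q.2)) r1)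
    PySem.Dict.empty).items

-- ===== PRECONDITION & SPEC =====
-- Pre_ excludes non-positive bus_width: at 0 Python A raises ZeroDivisionError, and for
-- negative widths A loops forever whenever any value list is nonempty; on the remaining
-- degenerate negative-width inputs A's empty result is an accident of its loop bound.
def Pre_split_read_to_bus_width (values : List (Int × List Int)) (bus_width : Int) : Prop :=
  1 ≤ bus_width
instance (values : List (Int × List Int)) (bus_width : Int) : Decidable (Pre_split_read_to_bus_width values bus_width) := by unfold Pre_split_read_to_bus_width; infer_instance
def pvWitness_split_read_to_bus_width : (List (Int × List Int)) × Int := ([(1, [10, 20, 30]), (4, [7])], 2)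

def Spec_split_read_to_bus_width (values : List (Int × List Int)) (bus_width : Int) (out : List (Int × List Int)) : Prop := out = split_read_to_bus_width_alt values bus_width
instance (values : List (Int × List Int)) (bus_width : Int) (out : List (Int × List Int)) : Decidable (Spec_split_read_to_bus_width values bus_width out) := by unfold Spec_split_read_to_bus_width; infer_instance

-- ===== CLAIM (what is proved, stated in full; the proofs are below) =====
def Claim_equal_split_read_to_bus_width : Prop := ∀ (values : List (Int × List Int)) (bus_width : Int), Dom_split_read_to_bus_width values bus_width → Pre_split_read_to_bus_width values bus_width → Spec_split_read_to_bus_width values bus_width (split_read_to_bus_width values bus_width)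

-- ===== LEMMAS AND PROOFS =====

-- proof-side abbreviations: C = skeleton step, W = A's net writes into one block,
-- T = B's scatter step reindexed by the absolute address t
def pvC (bw : Int) (r : PySem.Dict Int (List Int)) (b : Int) : PySem.Dict Int (List Int) :=
  r.setdefault b (List.replicate bw.toNat 0)

def pvW (a : Int) (vs : List Int) (x : Int) (bw : Int) (r : PySem.Dict Int (List Int)) :
    PySem.Dict Int (List Int) :=
  (PySem.List.pyRange 0 bw 1).foldl
    (fun r i =>
      if a ≤ x + i ∧ x + i < a + PySem.List.len vs then
        r.modify x [] (fun b => PySem.List.pySetD b i (PySem.List.pyGetD vs (x + i - a) 0))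
      else r) r

def pvT (a : Int) (vs : List Int) (bw : Int) (r : PySem.Dict Int (List Int)) (t : Int) :
    PySem.Dict Int (List Int) :=
  r.modify (PySem.Int.floordiv t bw * bw) []
    (fun b => PySem.List.pySetD b (PySem.Int.mod t bw) (PySem.List.pyGetD vs (t - a) 0))

-- positive-step range: nil / cons unfolding
lemma pvRange_pos_nil {a b s : Int} (hs : 0 < s) (h : b ≤ a) :
    PySem.List.pyRange a b s = [] := by
  rw [PySem.List.pyRange_of_pos _ _ hs, if_neg (by omega)]
  simp

lemma pvRange_pos_cons {a b s : Int} (hs : 0 < s) (h : a < b) :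
    PySem.List.pyRange a b s = a :: PySem.List.pyRange (a + s) b s := by
  rw [PySem.List.pyRange_of_pos _ _ hs, PySem.List.pyRange_of_pos _ _ hs, if_pos h]
  have hnum : b - a + s - 1 = (b - a - 1) + 1 * s := by ring
  have hq : (b - a + s - 1) / s = (b - a - 1) / s + 1 := by
    rw [hnum, Int.add_mul_ediv_right _ _ (by omega : s ≠ 0)]
  have hq0 : 0 ≤ (b - a - 1) / s := Int.ediv_nonneg (by omega) (by omega)
  have hcount : ((b - a + s - 1) / s).toNat = ((b - a - 1) / s).toNat + 1 := by omega
  rw [hcount, List.range_succ_eq_map, List.map_cons, List.map_map]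
  refine congrArg₂ List.cons (by simp) ?_
  rcases lt_or_ge (a + s) b with hlt | hge
  · rw [if_pos hlt]
    have hnum2 : b - (a + s) + s - 1 = b - a - 1 := by ring
    rw [hnum2]
    apply List.map_congr_left
    intro k _
    simp only [Function.comp_apply]
    push_cast
    ring
  · have hz : (b - a - 1) / s = 0 := by
      apply Int.ediv_eq_zero_of_lt (by omega) (by omega)
    rw [if_neg (by omega), hz]
    simp

-- A's inner i-loop: the running offset is the arithmetic offset x + i - a
lemma pvInner_aux (a : Int) (vs : List Int) (bw x : Int) :
    ∀ (n : Nat) (j : Int) (r : PySem.Dict Int (List Int)), j ≤ bw → (bw - j).toNat = n →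
      (PySem.List.pyRange j bw 1).foldl
        (fun s i =>
          if a ≤ x + i ∧ x + i < a + PySem.List.len vs then
            (s.1.modify x [] (fun b => PySem.List.pySetD b i (PySem.List.pyGetD vs s.2 0)), s.2 + 1)
          else s)
        (r, min (max (x + j - a) 0) (PySem.List.len vs)) =
      ((PySem.List.pyRange j bw 1).foldl
        (fun r i =>
          if a ≤ x + i ∧ x + i < a + PySem.List.len vs then
            r.modify x [] (fun b => PySem.List.pySetD b i (PySem.List.pyGetD vs (x + i - a) 0))
          else r) r,
       min (max (x + bw - a) 0) (PySem.List.len vs)) := by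
  have hL : PySem.List.len vs = (vs.length : Int) := PySem.List.len_eq vs
  intro n
  induction n with
  | zero =>
    intro j r hj hn
    have hj' : j = bw := by omega
    rw [PySem.List.pyRange_one_eq_nil (by omega : bw ≤ j)]
    simp [hj']
  | succ n ih =>
    intro j r hj hn
    have hjb : j < bw := by omega
    rw [PySem.List.pyRange_one_cons hjb]
    simp only [List.foldl_cons]
    by_cases hc : a ≤ x + j ∧ x + j < a + PySem.List.len vs
    · rw [if_pos hc, if_pos hc]
      have hoff : min (max (x + j - a) 0) (PySem.List.len vs) = x + j - a := by
        rw [hL]; rw [hL] at hc; omega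
      rw [hoff]
      have hoff2 : x + j - a + 1 = min (max (x + (j + 1) - a) 0) (PySem.List.len vs) := by
        rw [hL]; rw [hL] at hc; omega
      rw [hoff2]
      exact ih (j + 1) _ (by omega) (by omega)
    · rw [if_neg hc, if_neg hc]
      have hoff : min (max (x + j - a) 0) (PySem.List.len vs)
          = min (max (x + (j + 1) - a) 0) (PySem.List.len vs) := by
        rcases not_and_or.mp hc with h | h
        · rw [hL]; omega
        · rw [hL]; rw [hL] at h; omega
      rw [hoff]
      exact ih (j + 1) r (by omega) (by omega)

-- A's conditional block creation is Python's dict.setdefault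
lemma pvC_eq (bw : Int) (r : PySem.Dict Int (List Int)) (b : Int) :
    (if r.contains b then r else r.insert b (List.replicate bw.toNat 0)) = pvC bw r b := by
  unfold pvC PySem.Dict.setdefault PySem.Dict.insert
  by_cases h : r.contains b = true
  · simp [h]
  · simp [h]

-- A's while loop is the fold of (write ∘ create) over the aligned block list
lemma pvWhile_eq (a : Int) (vs : List Int) (bw : Int) (hbw : 0 < bw) :
    ∀ (fuel : Nat) (base : Int) (r : PySem.Dict Int (List Int)),
      a < base + bw → (a + PySem.List.len vs - base).toNat ≤ fuel →
      pvWhileA a vs bw fuel base (r, min (max (base - a) 0) (PySem.List.len vs)) =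
      (PySem.List.pyRange base (a + PySem.List.len vs) bw).foldl
        (fun r b => pvW a vs b bw (pvC bw r b)) r := by
  have hL : PySem.List.len vs = (vs.length : Int) := PySem.List.len_eq vs
  intro fuel
  induction fuel with
  | zero =>
    intro base r hab hfuel
    have hend : a + PySem.List.len vs ≤ base := by rw [hL]; rw [hL] at hfuel; omega
    rw [pvRange_pos_nil hbw hend]
    rfl
  | succ fuel ih =>
    intro base r hab hfuel
    by_cases h : base < a + PySem.List.len vs
    · rw [pvRange_pos_cons hbw h, List.foldl_cons]
      have hstep : pvWhileA a vs bw (fuel + 1) base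
          (r, min (max (base - a) 0) (PySem.List.len vs)) =
          pvWhileA a vs bw fuel (base + bw)
            (pvInnerA a vs bw base
              ((if r.contains base then r else r.insert base (List.replicate bw.toNat 0)),
               min (max (base - a) 0) (PySem.List.len vs))) := by
        simp only [pvWhileA, if_pos h]
      rw [hstep]
      have hzero : min (max (base - a) 0) (PySem.List.len vs)
          = min (max (base + 0 - a) 0) (PySem.List.len vs) := by norm_num
      rw [hzero]
      unfold pvInnerA
      rw [pvInner_aux a vs bw base (bw - 0).toNat 0 _ (by omega) rfl]
      rw [pvC_eq]
      exact ih (base + bw) _ (by omega) (by rw [hL]; rw [hL] at hfuel; omega)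
    · have hstep : pvWhileA a vs bw (fuel + 1) base
          (r, min (max (base - a) 0) (PySem.List.len vs)) = r := by
        simp only [pvWhileA, if_neg h]
      rw [hstep, pvRange_pos_nil hbw (not_lt.mp h)]
      rfl

-- setdefault at y commutes with a write fold at a present key x ≠ y
lemma pvSetdefault_insert_comm (d : PySem.Dict Int (List Int)) (x y : Int) (v w : List Int)
    (hxy : x ≠ y) (hx : d.contains x = true) :
    (d.insert x v).setdefault y w = (d.setdefault y w).insert x v := by
  have hyx : (y == x) = false := beq_eq_false_iff_ne.mpr (Ne.symm hxy)
  cases hy : d.contains y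
  · have hy1 : (d.insert x v).contains y = false := by
      rw [PySem.Dict.contains_insert]
      simp [hyx, hy]
    rw [PySem.Dict.setdefault_of_not_contains _ _ hy1,
        PySem.Dict.setdefault_of_not_contains _ _ hy]
    have hx2 : (d.insert y w).contains x = true := by
      rw [PySem.Dict.contains_insert]
      simp [hx]
    apply PySem.Dict.ext
    rw [PySem.Dict.items_insert_of_not_contains _ _ hy1,
        PySem.Dict.items_insert_of_contains _ _ hx,
        PySem.Dict.items_insert_of_contains _ _ hx2,
        PySem.Dict.items_insert_of_not_contains _ _ hy,
        List.map_append]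
    simp [Ne.symm hxy]
  · have hy1 : (d.insert x v).contains y = true := by
      rw [PySem.Dict.contains_insert, hy]
      simp
    rw [PySem.Dict.setdefault_of_contains _ _ hy1,
        PySem.Dict.setdefault_of_contains _ _ hy]

lemma pvSetdefault_modify_comm (d : PySem.Dict Int (List Int)) (x y : Int)
    (f : List Int → List Int) (w : List Int) (hxy : x ≠ y) (hx : d.contains x = true) :
    (d.modify x [] f).setdefault y w = (d.setdefault y w).modify x [] f := by
  simp only [PySem.Dict.modify]
  have hg : (d.setdefault y w).getD x [] = d.getD x [] := by
    rw [PySem.Dict.getD_eq_get?_getD, PySem.Dict.getD_eq_get?_getD,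
        PySem.Dict.get?_setdefault_of_ne _ _ hxy]
  rw [hg]
  exact pvSetdefault_insert_comm d x y _ w hxy hx

lemma pvFold_setdefault_comm (a : Int) (vs : List Int) (x y : Int) (w : List Int)
    (hxy : x ≠ y) :
    ∀ (l : List Int) (d : PySem.Dict Int (List Int)), d.contains x = true →
      (l.foldl (fun r i =>
        if a ≤ x + i ∧ x + i < a + PySem.List.len vs then
          r.modify x [] (fun b => PySem.List.pySetD b i (PySem.List.pyGetD vs (x + i - a) 0))
        else r) d).setdefault y w =
      l.foldl (fun r i =>
        if a ≤ x + i ∧ x + i < a + PySem.List.len vs then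
          r.modify x [] (fun b => PySem.List.pySetD b i (PySem.List.pyGetD vs (x + i - a) 0))
        else r) (d.setdefault y w) := by
  intro l
  induction l with
  | nil => intro d _; simp
  | cons i l ihl =>
    intro d hx
    simp only [List.foldl_cons]
    by_cases hc : a ≤ x + i ∧ x + i < a + PySem.List.len vs
    · rw [if_pos hc, if_pos hc]
      have hx' : (d.modify x []
          (fun b => PySem.List.pySetD b i (PySem.List.pyGetD vs (x + i - a) 0))).contains x
          = true := by
        rw [PySem.Dict.contains_modify]
        simp
      rw [ihl _ hx', pvSetdefault_modify_comm d x y _ w hxy hx]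
    · rw [if_neg hc, if_neg hc]
      exact ihl d hx

lemma pvSetdefault_pvW_comm (a : Int) (vs : List Int) (bw x y : Int) (w : List Int)
    (d : PySem.Dict Int (List Int)) (hxy : x ≠ y) (hx : d.contains x = true) :
    (pvW a vs x bw d).setdefault y w = pvW a vs x bw (d.setdefault y w) := by
  unfold pvW
  exact pvFold_setdefault_comm a vs x y w hxy (PySem.List.pyRange 0 bw 1) d hx

-- the whole skeleton pass commutes with the writes into an already-created block
lemma pvSkeleton_pvW_comm (a : Int) (vs : List Int) (bw x : Int)
    (bs : List Int) (d : PySem.Dict Int (List Int))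
    (hne : ∀ y ∈ bs, y ≠ x) (hx : d.contains x = true) :
    bs.foldl (pvC bw) (pvW a vs x bw d) = pvW a vs x bw (bs.foldl (pvC bw) d) := by
  revert hne hx
  induction bs generalizing d with
  | nil => intro _ _; simp
  | cons b bs ihb =>
    intro hne hx
    simp only [List.foldl_cons]
    have hb : b ≠ x := hne b (List.mem_cons_self ..)
    have step1 : pvC bw (pvW a vs x bw d) b = pvW a vs x bw (pvC bw d b) := by
      unfold pvC
      exact pvSetdefault_pvW_comm a vs bw x b _ d (Ne.symm hb) hx
    rw [step1]
    exact ihb (pvC bw d b) (fun y hy => hne y (List.mem_cons_of_mem _ hy))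
      (by unfold pvC; rw [PySem.Dict.contains_setdefault, hx]; simp)

-- one block's worth of A-writes = the scatter steps of the addresses falling in it
lemma pvBlock_eq (a : Int) (vs : List Int) (bw x : Int) (hbw : 0 < bw)
    (hdvd : bw ∣ x) (hax : a < x + bw) (hx : x < a + PySem.List.len vs)
    (S : PySem.Dict Int (List Int)) :
    pvW a vs x bw S =
    (PySem.List.pyRange (max x a) (min (x + bw) (a + PySem.List.len vs)) 1).foldl
      (pvT a vs bw) S := by
  obtain ⟨q, hq⟩ := hdvd
  have hq' : q * bw = x := by rw [hq]; ring
  have hq2 : (q + 1) * bw = x + bw := by rw [hq]; ring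
  have hlen0 : (0 : Int) ≤ PySem.List.len vs := by
    rw [PySem.List.len_eq]; exact Int.natCast_nonneg _
  unfold pvW
  have h1 : (0 : Int) ≤ max (a - x) 0 := le_max_right _ _
  have h2 : max (a - x) 0 ≤ min (a + PySem.List.len vs - x) bw := by omega
  have h3 : min (a + PySem.List.len vs - x) bw ≤ bw := min_le_right _ _
  rw [PySem.List.pyRange_one_append 0 (max (a - x) 0) bw h1 (le_trans h2 h3),
      PySem.List.pyRange_one_append (max (a - x) 0) (min (a + PySem.List.len vs - x) bw) bw h2 h3,
      List.foldl_append, List.foldl_append]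
  have e1 : ∀ (T : PySem.Dict Int (List Int)) (lo hi : Int),
      (∀ i : Int, lo ≤ i → i < hi → ¬(a ≤ x + i ∧ x + i < a + PySem.List.len vs)) →
      (PySem.List.pyRange lo hi 1).foldl
        (fun r i => if a ≤ x + i ∧ x + i < a + PySem.List.len vs then
            r.modify x [] (fun b => PySem.List.pySetD b i (PySem.List.pyGetD vs (x + i - a) 0))
          else r) T = T := by
    intro T lo hi hcond
    refine Eq.trans (PySem.List.foldl_congr_mem _ _ (fun r _ => r) _ ?_)
      (PySem.List.foldl_ignore _ _)
    intro r i hi'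
    rw [PySem.List.mem_pyRange_one] at hi'
    exact if_neg (hcond i hi'.1 hi'.2)
  rw [e1 _ 0 (max (a - x) 0) (by intro i hi1 hi2; omega),
      e1 _ (min (a + PySem.List.len vs - x) bw) bw (by intro i hi1 hi2; omega)]
  have hmax : max x a = x + max (a - x) 0 := by omega
  have hmin : min (x + bw) (a + PySem.List.len vs) = x + min (a + PySem.List.len vs - x) bw := by
    omega
  rw [hmax, hmin]
  rw [PySem.List.pyRange_one (max (a - x) 0) (min (a + PySem.List.len vs - x) bw),
      PySem.List.pyRange_one (x + max (a - x) 0) (x + min (a + PySem.List.len vs - x) bw)]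
  rw [show (x + min (a + PySem.List.len vs - x) bw - (x + max (a - x) 0)).toNat
        = (min (a + PySem.List.len vs - x) bw - max (a - x) 0).toNat from by omega]
  rw [List.foldl_map, List.foldl_map]
  apply PySem.List.foldl_congr_mem
  intro r k hk
  rw [List.mem_range] at hk
  have hk' : (k : Int) < min (a + PySem.List.len vs - x) bw - max (a - x) 0 := by omega
  rw [if_pos (by constructor <;> omega)]
  have hfd : PySem.Int.floordiv (x + max (a - x) 0 + (k : Int)) bw = q := by
    rw [PySem.Int.floordiv_eq_iff_of_pos hbw]
    constructor
    · rw [hq']; omega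
    · rw [hq2]; omega
  have hmm := PySem.Int.floordiv_mul_add_mod (x + max (a - x) 0 + (k : Int)) bw
  rw [hfd, hq'] at hmm
  unfold pvT
  rw [show PySem.Int.floordiv (x + max (a - x) 0 + (k : Int)) bw * bw = x from by rw [hfd, hq'],
      show PySem.Int.mod (x + max (a - x) 0 + (k : Int)) bw = max (a - x) 0 + (k : Int) from by
        omega,
      show x + max (a - x) 0 + (k : Int) - a = x + (max (a - x) 0 + (k : Int)) - a from by ring]

-- B's scatter pass, reindexed by absolute address
lemma pvScatter_eq (a : Int) (vs : List Int) (bw : Int)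
    (r : PySem.Dict Int (List Int)) :
    (PySem.List.enumerate vs).foldl
      (fun r q =>
        r.modify (PySem.Int.floordiv (a + q.1) bw * bw) []
          (fun b => PySem.List.pySetD b (PySem.Int.mod (a + q.1) bw) q.2)) r =
    (PySem.List.pyRange a (a + PySem.List.len vs) 1).foldl (pvT a vs bw) r := by
  rw [PySem.List.enumerate_eq_map_pyRange vs 0, List.foldl_map]
  rw [PySem.List.pyRange_one 0 (PySem.List.len vs), PySem.List.pyRange_one a (a + PySem.List.len vs)]
  rw [show (a + PySem.List.len vs - a).toNat = (PySem.List.len vs - 0).toNat from by omega]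
  rw [List.foldl_map, List.foldl_map]
  apply PySem.List.foldl_congr_mem
  intro r k hk
  dsimp only
  unfold pvT
  simp only [zero_add]
  rw [show a + (k : Int) - a = (k : Int) from by ring]

-- main per-address induction: interleaved (write ∘ create) = skeleton then scatter
lemma pvMain_aux (a : Int) (vs : List Int) (bw : Int) (hbw : 0 < bw) :
    ∀ (n : Nat) (x : Int) (d : PySem.Dict Int (List Int)),
      (a + PySem.List.len vs - x).toNat = n → bw ∣ x → a < x + bw →
      (PySem.List.pyRange x (a + PySem.List.len vs) bw).foldl
        (fun r b => pvW a vs b bw (pvC bw r b)) d =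
      (PySem.List.pyRange (max x a) (a + PySem.List.len vs) 1).foldl (pvT a vs bw)
        ((PySem.List.pyRange x (a + PySem.List.len vs) bw).foldl (pvC bw) d) := by
  have hlen0 : (0 : Int) ≤ PySem.List.len vs := by
    rw [PySem.List.len_eq]; exact Int.natCast_nonneg _
  intro n
  induction n using Nat.strong_induction_on with
  | _ n ih =>
    intro x d hn hdvd hax
    by_cases hx : x < a + PySem.List.len vs
    · rw [pvRange_pos_cons hbw hx]
      simp only [List.foldl_cons]
      have hdvd' : bw ∣ x + bw := dvd_add hdvd dvd_rfl
      have hm : (a + PySem.List.len vs - (x + bw)).toNat < n := by omega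
      rw [ih (a + PySem.List.len vs - (x + bw)).toNat hm (x + bw)
          (pvW a vs x bw (pvC bw d x)) rfl hdvd' (by omega)]
      rw [pvSkeleton_pvW_comm a vs bw x _ (pvC bw d x)
          (fun y hy => by rw [PySem.List.mem_pyRange_iff_of_pos hbw] at hy; omega)
          (by unfold pvC; rw [PySem.Dict.contains_setdefault]; simp)]
      rw [pvBlock_eq a vs bw x hbw hdvd hax hx]
      have hsplit : PySem.List.pyRange (max x a) (a + PySem.List.len vs) 1
          = PySem.List.pyRange (max x a) (min (x + bw) (a + PySem.List.len vs)) 1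
            ++ PySem.List.pyRange (max (x + bw) a) (a + PySem.List.len vs) 1 := by
        by_cases hle : x + bw ≤ a + PySem.List.len vs
        · rw [show min (x + bw) (a + PySem.List.len vs) = x + bw from by omega,
              show max (x + bw) a = x + bw from by omega]
          exact PySem.List.pyRange_one_append (max x a) (x + bw) (a + PySem.List.len vs)
            (by omega) hle
        · rw [show min (x + bw) (a + PySem.List.len vs) = a + PySem.List.len vs from by omega,
              PySem.List.pyRange_one_eq_nil
                (show a + PySem.List.len vs ≤ max (x + bw) a from by omega),
              List.append_nil]
      rw [hsplit, List.foldl_append]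
    · rw [pvRange_pos_nil hbw (not_lt.mp hx),
          PySem.List.pyRange_one_eq_nil (show a + PySem.List.len vs ≤ max x a from by omega)]
      simp

-- per-address step equality between the two ports
lemma pvStep_eq (a : Int) (vs : List Int) (bw : Int) (hbw : 1 ≤ bw)
    (ret : PySem.Dict Int (List Int)) :
    pvWhileA a vs bw (a + PySem.List.len vs - PySem.Int.floordiv a bw * bw).toNat
      (PySem.Int.floordiv a bw * bw) (ret, 0) =
    (PySem.List.enumerate vs).foldl
      (fun r q =>
        r.modify (PySem.Int.floordiv (a + q.1) bw * bw) []
          (fun b => PySem.List.pySetD b (PySem.Int.mod (a + q.1) bw) q.2))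
      ((PySem.List.pyRange (PySem.Int.floordiv a bw * bw) (a + PySem.List.len vs) bw).foldl
        (fun r base => r.setdefault base (List.replicate bw.toNat 0)) ret) := by
  have hbw0 : (0 : Int) < bw := by omega
  have hfd := PySem.Int.floordiv_mul_add_mod a bw
  have hm0 := PySem.Int.mod_nonneg a hbw0
  have hm1 := PySem.Int.mod_lt a hbw0
  have hlen0 : (0 : Int) ≤ PySem.List.len vs := by
    rw [PySem.List.len_eq]; exact Int.natCast_nonneg _
  have hoff0 : (0 : Int)
      = min (max (PySem.Int.floordiv a bw * bw - a) 0) (PySem.List.len vs) := by omega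
  conv_lhs => rw [hoff0]
  rw [pvWhile_eq a vs bw hbw0 _ _ ret (by omega) (le_refl _)]
  rw [pvMain_aux a vs bw hbw0
      ((a + PySem.List.len vs - PySem.Int.floordiv a bw * bw).toNat)
      (PySem.Int.floordiv a bw * bw) ret rfl (dvd_mul_left bw _) (by omega)]
  rw [show max (PySem.Int.floordiv a bw * bw) a = a from by omega]
  rw [← pvScatter_eq a vs bw]
  rfl

-- ===== VERDICT (by name: the statement is the Claim_ definition above) =====
theorem split_read_to_bus_width_spec : Claim_equal_split_read_to_bus_width := by
  intro values bus_width _hdom hpre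
  unfold Spec_split_read_to_bus_width
  unfold split_read_to_bus_width split_read_to_bus_width_alt
  refine congrArg PySem.Dict.items ?_
  refine PySem.List.foldl_congr_mem values _ _ _ ?_
  intro acc p _hp
  exact pvStep_eq p.1 p.2 bus_width hpre acc
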